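-- pv_equiv track=rewrite | github.com/IgorMakurov/Lab6 | main-2.py | check_shift_limits
-- ===== SOURCE A (Python) =====
-- def check_shift_limits(schedule, num_men, num_women, num_places, num_shifts):
--     workers = ['M' + str(i+1) for i in range(num_men)] + ['W' + str(i+1) for i in range(num_women)]
--     for worker in workers:
--       shift_count = 0
--       for shift_workers in schedule:
--           for place_worker in shift_workers:
--             if place_worker == worker:
--                 shift_count+=1
--       if worker[0] == 'M' and shift_count > 2:
--         return False
--       if worker[0] == 'W' and shift_count > 1:
--         return False
--     return True
-- ===== SOURCE B (Python) =====
-- def check_shift_limits(schedule, num_men, num_women, num_places, num_shifts):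
--     counts = {}
--     for shift_workers in schedule:
--         for name in shift_workers:
--             counts[name] = counts.get(name, 0) + 1
--     return all(counts.get('M' + str(i + 1), 0) <= 2 for i in range(num_men)) \
--        and all(counts.get('W' + str(i + 1), 0) <= 1 for i in range(num_women))
-- ===== Notes on version B (the rewrite author's own statement) =====
-- stated objective: faster
-- what changed: B builds a name-count dictionary in one pass over the schedule and then checks each generated worker's limit by O(1) lookup, instead of A's outer loop that re-scans the whole schedule once per worker.
import Mathlib
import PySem

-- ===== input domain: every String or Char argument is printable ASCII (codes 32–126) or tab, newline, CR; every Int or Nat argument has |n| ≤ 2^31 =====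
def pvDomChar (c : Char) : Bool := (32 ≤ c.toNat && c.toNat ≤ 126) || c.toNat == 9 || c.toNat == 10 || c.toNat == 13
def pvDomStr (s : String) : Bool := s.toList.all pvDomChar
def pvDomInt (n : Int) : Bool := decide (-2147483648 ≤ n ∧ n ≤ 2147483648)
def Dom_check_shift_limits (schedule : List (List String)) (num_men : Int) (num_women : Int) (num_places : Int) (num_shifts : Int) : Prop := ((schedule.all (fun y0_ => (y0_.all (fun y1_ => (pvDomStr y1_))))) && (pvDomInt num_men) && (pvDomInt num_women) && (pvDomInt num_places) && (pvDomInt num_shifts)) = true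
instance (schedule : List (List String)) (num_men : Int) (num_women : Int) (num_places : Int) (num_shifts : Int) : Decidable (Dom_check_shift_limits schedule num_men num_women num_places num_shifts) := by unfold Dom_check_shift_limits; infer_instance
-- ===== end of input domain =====

-- B builds the name→count dictionary in ONE pass over the schedule and checks each worker by O(1) lookup,
-- instead of A's outer loop re-scanning the whole schedule once per worker (objective: faster).

-- ===== PORT A =====
-- Python A's inner double loop: shift_count accumulated over the schedule
def pvCountWorker (schedule : List (List String)) (worker : String) : Int :=
  schedule.foldl (fun acc sw => sw.foldl (fun a pw => if pw == worker then a + 1 else a) acc) 0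

-- Python A's outer 'for worker in workers' with its two early 'return False's
def pvCheckLoop (schedule : List (List String)) : List String → Bool
  | [] => true
  | worker :: rest =>
    let shift_count := pvCountWorker schedule worker
    if PySem.Str.pyGet? worker 0 == some 'M' && decide (shift_count > 2) then false
    else if PySem.Str.pyGet? worker 0 == some 'W' && decide (shift_count > 1) then false
    else pvCheckLoop schedule rest

def check_shift_limits (schedule : List (List String)) (num_men : Int) (num_women : Int) (num_places : Int) (num_shifts : Int) : Bool :=
  let workers := (PySem.List.pyRange 0 num_men 1).map (fun i => "M" ++ PySem.Int.toStr (i + 1))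
              ++ (PySem.List.pyRange 0 num_women 1).map (fun i => "W" ++ PySem.Int.toStr (i + 1))
  pvCheckLoop schedule workers

-- ===== PORT B =====
def check_shift_limits_alt (schedule : List (List String)) (num_men : Int) (num_women : Int) (num_places : Int) (num_shifts : Int) : Bool :=
  let counts : PySem.Dict String Int :=
    schedule.foldl (fun d sw => sw.foldl (fun d name => d.insert name (d.getD name 0 + 1)) d) PySem.Dict.empty
  ((PySem.List.pyRange 0 num_men 1).all fun i => decide (counts.getD ("M" ++ PySem.Int.toStr (i + 1)) 0 ≤ 2)) &&
  ((PySem.List.pyRange 0 num_women 1).all fun i => decide (counts.getD ("W" ++ PySem.Int.toStr (i + 1)) 0 ≤ 1))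

-- ===== PRECONDITION & SPEC =====
def Spec_check_shift_limits (schedule : List (List String)) (num_men : Int) (num_women : Int) (num_places : Int) (num_shifts : Int) (out : Bool) : Prop := out = check_shift_limits_alt schedule num_men num_women num_places num_shifts
instance (schedule : List (List String)) (num_men : Int) (num_women : Int) (num_places : Int) (num_shifts : Int) (out : Bool) : Decidable (Spec_check_shift_limits schedule num_men num_women num_places num_shifts out) := by unfold Spec_check_shift_limits; infer_instance

-- ===== CLAIM (what is proved, stated in full; the proofs are below) =====
def Claim_equal_check_shift_limits : Prop := ∀ (schedule : List (List String)) (num_men : Int) (num_women : Int) (num_places : Int) (num_shifts : Int), Dom_check_shift_limits schedule num_men num_women num_places num_shifts → Spec_check_shift_limits schedule num_men num_women num_places num_shifts (check_shift_limits schedule num_men num_women num_places num_shifts)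

-- ===== LEMMAS AND PROOFS =====

-- nested fold over a list of lists = fold over the flattening
theorem pv_foldl_foldl_flatMap {α β : Type} (f : β → α → β) (xss : List (List α)) (init : β) :
    xss.foldl (fun b xs => xs.foldl f b) init = (xss.flatMap id).foldl f init := by
  induction xss generalizing init with
  | nil => rfl
  | cons xs rest ih => simp [List.flatMap_cons, List.foldl_append, ih]

theorem pv_count_foldl (worker : String) (l : List String) (acc : Int) :
    l.foldl (fun a pw => if pw == worker then a + 1 else a) acc = acc + l.count worker := by
  induction l generalizing acc with
  | nil => simp
  | cons x xs ih =>
    simp only [List.foldl_cons]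
    rw [ih, List.count_cons]
    by_cases h : x = worker <;> simp [h] <;> omega

theorem pvCountWorker_eq (schedule : List (List String)) (worker : String) :
    pvCountWorker schedule worker = ((schedule.flatMap id).count worker : Int) := by
  unfold pvCountWorker
  rw [pv_foldl_foldl_flatMap, pv_count_foldl]
  simp

theorem pv_counts_eq (schedule : List (List String)) (name : String) :
    (schedule.foldl (fun d sw => sw.foldl (fun d name => d.insert name (d.getD name 0 + 1)) d)
      (PySem.Dict.empty : PySem.Dict String Int)).getD name 0
      = ((schedule.flatMap id).count name : Int) := by
  rw [pv_foldl_foldl_flatMap, PySem.Dict.foldl_insert_getD_add_one_eq_counter,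
    PySem.Dict.getD_counter]

theorem pv_head_M (t : String) : PySem.Str.pyGet? ("M" ++ t) 0 = some 'M' := by
  simp [PySem.Str.pyGet?, PySem.Chars.pyGet?, PySem.List.pyGet?, PySem.List.pyIdx?]

theorem pv_head_W (t : String) : PySem.Str.pyGet? ("W" ++ t) 0 = some 'W' := by
  simp [PySem.Str.pyGet?, PySem.Chars.pyGet?, PySem.List.pyGet?, PySem.List.pyIdx?]

theorem pvCheckLoop_all (schedule : List (List String)) (ws : List String) :
    pvCheckLoop schedule ws =
      ws.all (fun worker =>
        !(PySem.Str.pyGet? worker 0 == some 'M' && decide (pvCountWorker schedule worker > 2)) &&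
        !(PySem.Str.pyGet? worker 0 == some 'W' && decide (pvCountWorker schedule worker > 1))) := by
  induction ws with
  | nil => rfl
  | cons w rest ih =>
    rw [pvCheckLoop, List.all_cons, ← ih]
    cases h1 : (PySem.Str.pyGet? w 0 == some 'M' && decide (pvCountWorker schedule w > 2)) <;>
      cases h2 : (PySem.Str.pyGet? w 0 == some 'W' && decide (pvCountWorker schedule w > 1)) <;>
        simp only [h1, h2, if_true, if_false, Bool.not_true, Bool.not_false, Bool.true_and,
          Bool.false_and, Bool.and_true, Bool.and_false, cond_true, cond_false] <;> simp

theorem pv_all_congr {α : Type} {l : List α} {p q : α → Bool} (h : ∀ x ∈ l, p x = q x) :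
    l.all p = l.all q := by
  induction l with
  | nil => rfl
  | cons x xs ih =>
    rw [List.all_cons, List.all_cons, h x (by simp), ih fun y hy => h y (by simp [hy])]

-- ===== VERDICT (by name: the statement is the Claim_ definition above) =====
theorem check_shift_limits_spec : Claim_equal_check_shift_limits := by
  intro schedule num_men num_women num_places num_shifts _
  unfold Spec_check_shift_limits check_shift_limits check_shift_limits_alt
  rw [pvCheckLoop_all, List.all_append, List.all_map, List.all_map]
  congr 1
  · apply pv_all_congr
    intro i _
    rw [Function.comp_apply, pv_head_M, pvCountWorker_eq, pv_counts_eq]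
    set c := ((schedule.flatMap id).count ("M" ++ PySem.Int.toStr (i + 1)) : Int)
    by_cases h : c ≤ 2 <;> simp [h] <;> omega
  · apply pv_all_congr
    intro i _
    rw [Function.comp_apply, pv_head_W, pvCountWorker_eq, pv_counts_eq]
    set c := ((schedule.flatMap id).count ("W" ++ PySem.Int.toStr (i + 1)) : Int)
    by_cases h : c ≤ 1 <;> simp [h] <;> omega
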